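-- pv_equiv track=rewrite | github.com/bvucode/python-code | fngrams.py | fngrams
-- ===== SOURCE A (Python) =====
-- def fngrams(text, ngrams):
--     """ function to make n-grams"""
--     nlist = []
--     for i in text:
--         for x, j in enumerate(i):
--             trlist = []
--             tc = ""
--             tx = x
--             for k in range(ngrams):
--                 if k == 0:
--                     tc = str(i[tx])
--                 elif k > 0:
--                     try:
--                         tc += " " + str(i[tx])
--                     except IndexError:
--                         break
--                 trlist.append(tc)
--                 tx += 1
--             nlist.append(tuple(trlist))
--     return nlist
-- ===== SOURCE B (Python) =====
-- def fngrams(text, ngrams):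
--     """ function to make n-grams"""
--     return [
--         tuple(" ".join(str(t) for t in i[x:x + k + 1])
--               for k in range(min(ngrams, len(i) - x)))
--         for i in text
--         for x in range(len(i))
--     ]
-- ===== Notes on version B (the rewrite author's own statement) =====
-- stated objective: simpler
-- what changed: Replaces the running accumulator string tc, the manual tx index and the caught-IndexError break by a direct nested comprehension that builds each cumulative n-gram from a slice join, capping the gram count at min(ngrams, len(i)-x).
import Mathlib
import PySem

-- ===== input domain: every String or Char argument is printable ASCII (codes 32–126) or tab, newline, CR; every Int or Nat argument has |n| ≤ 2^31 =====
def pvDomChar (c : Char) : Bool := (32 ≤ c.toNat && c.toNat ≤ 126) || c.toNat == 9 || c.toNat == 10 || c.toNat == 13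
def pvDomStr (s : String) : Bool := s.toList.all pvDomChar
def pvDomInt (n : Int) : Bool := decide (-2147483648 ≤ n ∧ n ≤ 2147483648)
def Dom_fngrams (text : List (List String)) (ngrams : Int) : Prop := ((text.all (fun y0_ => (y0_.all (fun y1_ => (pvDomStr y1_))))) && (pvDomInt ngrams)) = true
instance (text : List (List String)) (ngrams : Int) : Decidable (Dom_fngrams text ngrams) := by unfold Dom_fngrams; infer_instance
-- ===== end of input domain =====

-- B replaces A's running accumulator tc / manual index tx / caught-IndexError break by a direct
-- comprehension joining a slice for each gram; equal return value on all inputs (objective: simpler).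

-- ===== PORT A =====
-- one iteration of A's inner 'for k in range(ngrams)' loop; state = (trlist, tc, tx, broken)
-- (broken records that the caught IndexError executed 'break': later iterations do nothing)
def fngramsStep (i : List String) (st : List String × String × Int × Bool) (k : Int) :
    List String × String × Int × Bool :=
  match st with
  | (trlist, tc, tx, broken) =>
    if broken then (trlist, tc, tx, broken)
    else if k = 0 then
      -- tc = str(i[tx]); here tx = x < len(i) (x comes from enumerate), so i[tx] never raises;
      -- str() is the identity on str
      let tc' := PySem.List.pyGetD i tx ""
      (trlist ++ [tc'], tc', tx + 1, false)
    else
      match PySem.List.pyGet? i tx with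
      | none => (trlist, tc, tx, true)          -- IndexError caught → break
      | some v => (trlist ++ [tc ++ " " ++ v], tc ++ " " ++ v, tx + 1, false)

def fngrams (text : List (List String)) (ngrams : Int) : List (List String) :=
  text.foldl (fun nlist i =>
    (PySem.List.enumerate i 0).foldl (fun nlist xj =>
      nlist ++ [((PySem.List.pyRange 0 ngrams 1).foldl (fngramsStep i) ([], "", xj.1, false)).1])
      nlist) []

-- ===== PORT B =====
def fngrams_alt (text : List (List String)) (ngrams : Int) : List (List String) :=
  text.flatMap (fun i =>
    (PySem.List.pyRange 0 (i.length : Int) 1).map (fun x =>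
      (PySem.List.pyRange 0 (min ngrams ((i.length : Int) - x)) 1).map (fun k =>
        -- " ".join(str(t) for t in i[x:x+k+1]); str() is the identity on str
        PySem.Str.join " " (PySem.List.slice i (some x) (some (x + k + 1))))))

-- ===== PRECONDITION & SPEC =====
def Spec_fngrams (text : List (List String)) (ngrams : Int) (out : List (List String)) : Prop := out = fngrams_alt text ngrams
instance (text : List (List String)) (ngrams : Int) (out : List (List String)) : Decidable (Spec_fngrams text ngrams out) := by unfold Spec_fngrams; infer_instance

-- ===== CLAIM (what is proved, stated in full; the proofs are below) =====
def Claim_equal_fngrams : Prop := ∀ (text : List (List String)) (ngrams : Int), Dom_fngrams text ngrams → Spec_fngrams text ngrams (fngrams text ngrams)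

-- ===== LEMMAS AND PROOFS =====

-- the gram of length m starting at position x
def gramT (i : List String) (x m : Nat) : String := PySem.Str.join " " ((i.drop x).take m)

theorem str_ext {s t : String} (h : s.toList = t.toList) : s = t := by
  have h2 := congrArg String.ofList h
  simpa using h2

theorem chars_join_snoc (sep : List Char) (a : List Char) :
    ∀ (l : List (List Char)), l ≠ [] →
    PySem.Chars.join sep (l ++ [a]) = PySem.Chars.join sep l ++ sep ++ a := by
  intro l
  induction l with
  | nil => intro h; exact absurd rfl h
  | cons b l ih =>
    intro _
    cases l with
    | nil => simp [PySem.Chars.join_cons_cons, PySem.Chars.join_singleton]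
    | cons c l =>
      conv_lhs => rw [List.cons_append, List.cons_append, PySem.Chars.join_cons_cons]
      rw [← List.cons_append, ih (by simp)]
      conv_rhs => rw [PySem.Chars.join_cons_cons]
      simp [List.append_assoc]

theorem join_snoc (l : List String) (a : String) (hl : l ≠ []) :
    PySem.Str.join " " (l ++ [a]) = PySem.Str.join " " l ++ " " ++ a := by
  apply str_ext
  simp only [PySem.Str.toList_join, List.map_append, List.map_cons, List.map_nil,
    String.toList_append]
  exact chars_join_snoc _ _ _ (by simpa using hl)

theorem gram_one (i : List String) (x : Nat) (hx : x < i.length) :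
    gramT i x 1 = i[x] := by
  have hd : i.drop x = i[x] :: i.drop (x + 1) := List.drop_eq_getElem_cons hx
  have h1 : (i.drop x).take 1 = [i[x]] := by rw [hd]; rfl
  apply str_ext
  rw [gramT, h1, PySem.Str.toList_join]
  simp only [List.map_cons, List.map_nil, PySem.Chars.join_singleton]

theorem gram_succ (i : List String) (x j : Nat) (hj : 1 ≤ j) (h : x + j < i.length) :
    gramT i x (j + 1) = gramT i x j ++ " " ++ i[x + j] := by
  have hjlen : j < (i.drop x).length := by simp; omega
  have htake : (i.drop x).take (j + 1) = (i.drop x).take j ++ [(i.drop x)[j]] := by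
    rw [List.take_succ, List.getElem?_eq_getElem hjlen]
    rfl
  have hget : (i.drop x)[j] = i[x + j] := by
    simp [List.getElem_drop]
  have hne : (i.drop x).take j ≠ [] := by
    have hlen : ((i.drop x).take j).length = j := by simp; omega
    intro hcon; rw [hcon] at hlen; simp at hlen; omega
  rw [gramT, htake, hget, join_snoc _ _ hne]
  rfl

theorem broken_absorb (i : List String) (ks : List Int) (trl : List String) (tc : String) (tx : Int) :
    ks.foldl (fngramsStep i) (trl, tc, tx, true) = (trl, tc, tx, true) := by
  induction ks with
  | nil => rfl
  | cons k ks ih => simpa [fngramsStep] using ih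

theorem tail_fold (i : List String) (x : Nat) (g : Int) :
    ∀ (c j : Nat) (L : List String), (j : Int) + c = g → 1 ≤ j → x + j ≤ i.length →
    ((PySem.List.pyRange (j : Int) g 1).foldl (fngramsStep i) (L, gramT i x j, ((x + j : Nat) : Int), false)).1
      = L ++ (List.range (min g.toNat (i.length - x) - j)).map (fun t => gramT i x (j + t + 1)) := by
  intro c
  induction c with
  | zero =>
    intro j L hg hj hxj
    have hnil : g ≤ (j : Int) := by omega
    rw [PySem.List.pyRange_one_eq_nil hnil]
    obtain ⟨M, hMdef⟩ : ∃ M, min g.toNat (i.length - x) = M := ⟨_, rfl⟩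
    rw [hMdef]
    have hml : M ≤ g.toNat := by rw [← hMdef]; exact Nat.min_le_left _ _
    have hz : M - j = 0 := by omega
    simp [hz]
  | succ c ih =>
    intro j L hg hj hxj
    have hjg : (j : Int) < g := by omega
    rw [PySem.List.pyRange_one_cons hjg]
    simp only [List.foldl_cons]
    have hk0 : ¬ ((j : Int) = 0) := by omega
    by_cases hlt : x + j < i.length
    · have hget : PySem.List.pyGet? i ((x + j : Nat) : Int) = some i[x + j] := by
        rw [PySem.List.pyGet?_natCast]
        exact List.getElem?_eq_getElem hlt
      have hstep : fngramsStep i (L, gramT i x j, ((x + j : Nat) : Int), false) (j : Int)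
          = (L ++ [gramT i x (j + 1)], gramT i x (j + 1), ((x + (j + 1) : Nat) : Int), false) := by
        simp only [fngramsStep, Bool.false_eq_true, if_false, if_neg hk0, hget,
          gram_succ i x j hj hlt, Prod.mk.injEq, eq_self_iff_true, and_true, true_and]
        omega
      rw [hstep]
      have hcast : ((j : Int) + 1) = (((j + 1 : Nat)) : Int) := by push_cast; ring
      rw [hcast]
      rw [ih (j + 1) (L ++ [gramT i x (j + 1)]) (by push_cast; omega) (by omega) (by omega)]
      obtain ⟨M, hMdef⟩ : ∃ M, min g.toNat (i.length - x) = M := ⟨_, rfl⟩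
      rw [hMdef]
      have hM : j + 1 ≤ M := by
        rw [← hMdef]; exact le_min (by omega) (by omega)
      obtain ⟨R, hR⟩ : ∃ R, M - j = R + 1 := ⟨M - (j + 1), by omega⟩
      have hR' : M - (j + 1) = R := by omega
      rw [hR', hR, List.range_succ_eq_map]
      simp only [List.map_cons, List.map_map, List.append_assoc, List.singleton_append,
        Nat.add_zero]
      refine congrArg (fun z => L ++ z) ?_
      refine congrArg₂ List.cons ?_ ?_
      · congr 1 <;> omega
      · apply List.map_congr_left
        intro t _
        simp only [Function.comp_apply]
        congr 1 <;> omega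
    · have hxeq : x + j = i.length := by omega
      have hget : PySem.List.pyGet? i ((x + j : Nat) : Int) = none := by
        rw [PySem.List.pyGet?_natCast]
        apply List.getElem?_eq_none
        omega
      have hstep : fngramsStep i (L, gramT i x j, ((x + j : Nat) : Int), false) (j : Int)
          = (L, gramT i x j, ((x + j : Nat) : Int), true) := by
        simp only [fngramsStep, Bool.false_eq_true, if_false, if_neg hk0, hget]
      rw [hstep, broken_absorb]
      obtain ⟨M, hMdef⟩ : ∃ M, min g.toNat (i.length - x) = M := ⟨_, rfl⟩
      rw [hMdef]
      have hmr : M ≤ i.length - x := by rw [← hMdef]; exact Nat.min_le_right _ _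
      have hz : M - j = 0 := by omega
      simp [hz]

theorem inner_eq (i : List String) (x : Nat) (hx : x < i.length) (g : Int) :
    ((PySem.List.pyRange 0 g 1).foldl (fngramsStep i) ([], "", (x : Int), false)).1
      = (PySem.List.pyRange 0 (min g ((i.length : Int) - (x : Int))) 1).map (fun k =>
          PySem.Str.join " " (PySem.List.slice i (some (x : Int)) (some ((x : Int) + k + 1)))) := by
  have hval : ∀ (t : Nat),
      PySem.Str.join " " (PySem.List.slice i (some ((x : Nat) : Int)) (some ((x : Int) + (t : Int) + 1)))
        = gramT i x (t + 1) := by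
    intro t
    have hc : ((x : Int) + (t : Int) + 1) = ((x : Int) + ((t + 1 : Nat) : Int)) := by push_cast; ring
    rw [hc, PySem.List.slice_natCast_add]
    rfl
  by_cases hg : g ≤ 0
  · rw [PySem.List.pyRange_one_eq_nil (by omega),
      PySem.List.pyRange_one_eq_nil (by
        have := min_le_left g ((i.length : Int) - (x : Int))
        omega : min g ((i.length : Int) - (x : Int)) ≤ 0)]
    rfl
  · push_neg at hg
    rw [PySem.List.pyRange_one_cons hg]
    simp only [List.foldl_cons]
    have hget : PySem.List.pyGetD i ((x : Nat) : Int) "" = i[x] := by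
      simp [PySem.List.pyGetD, PySem.List.pyGet?_natCast, List.getElem?_eq_getElem hx]
    have hstep : fngramsStep i ([], "", ((x : Nat) : Int), false) 0
        = ([gramT i x 1], gramT i x 1, ((x + 1 : Nat) : Int), false) := by
      simp [fngramsStep, hget, gram_one i x hx]
    rw [hstep]
    have h01 : (0 : Int) + 1 = ((1 : Nat) : Int) := by norm_num
    rw [h01]
    rw [tail_fold i x g (g - 1).toNat 1 [gramT i x 1] (by omega) (by omega) (by omega)]
    have hc1 : ((g.toNat : Nat) : Int) = g := by omega
    have hc2 : (((i.length - x : Nat)) : Int) = (i.length : Int) - (x : Int) := by omega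
    have hm : (min g ((i.length : Int) - (x : Int))) = ((min g.toNat (i.length - x) : Nat) : Int) := by
      rw [Nat.cast_min, hc1, hc2]
    rw [hm, PySem.List.pyRange_zero_natCast]
    obtain ⟨M, hMdef⟩ : ∃ M, min g.toNat (i.length - x) = M := ⟨_, rfl⟩
    rw [hMdef]
    have hM1 : 1 ≤ M := by
      rw [← hMdef]; exact le_min (by omega) (by omega)
    obtain ⟨R, hR⟩ : ∃ R, M = R + 1 := ⟨M - 1, by omega⟩
    rw [hR, Nat.add_sub_cancel, List.range_succ_eq_map]
    simp only [List.map_cons, List.map_map, List.singleton_append, Nat.succ_eq_add_one]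
    congr 1
    · simpa using (hval 0).symm
    · congr 1
      funext t
      simp only [Function.comp_apply]
      rw [hval (t + 1)]
      congr 1
      omega

theorem foldl_append_map {α β : Type} (f : α → β) (l : List α) :
    ∀ acc : List β, l.foldl (fun acc b => acc ++ [f b]) acc = acc ++ l.map f := by
  induction l with
  | nil => simp
  | cons a l ih => intro acc; simp [ih, List.append_assoc]

theorem per_row (i : List String) (g : Int) :
    (PySem.List.enumerate i 0).map (fun xj =>
        ((PySem.List.pyRange 0 g 1).foldl (fngramsStep i) ([], "", xj.1, false)).1)
      = (PySem.List.pyRange 0 (i.length : Int) 1).map (fun x =>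
          (PySem.List.pyRange 0 (min g ((i.length : Int) - x)) 1).map (fun k =>
            PySem.Str.join " " (PySem.List.slice i (some x) (some (x + k + 1))))) := by
  have hlen : PySem.List.len i = (i.length : Int) := by simp [PySem.List.len]
  rw [PySem.List.enumerate_eq_map_pyRange (d := ""), hlen, List.map_map]
  apply List.map_congr_left
  intro j hj
  rw [PySem.List.mem_pyRange_one] at hj
  obtain ⟨x, rfl⟩ : ∃ x : Nat, (x : Int) = j := ⟨j.toNat, by omega⟩
  have hx : x < i.length := by omega
  simpa only [Function.comp_apply] using inner_eq i x hx g

-- ===== VERDICT (by name: the statement is the Claim_ definition above) =====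
theorem fngrams_spec : Claim_equal_fngrams := by
  intro text ngrams _hdom
  unfold Spec_fngrams fngrams fngrams_alt
  clear _hdom
  suffices h : ∀ acc : List (List String),
      text.foldl (fun nlist i =>
        (PySem.List.enumerate i 0).foldl (fun nlist xj =>
          nlist ++ [((PySem.List.pyRange 0 ngrams 1).foldl (fngramsStep i) ([], "", xj.1, false)).1])
          nlist) acc
        = acc ++ text.flatMap (fun i =>
            (PySem.List.pyRange 0 (i.length : Int) 1).map (fun x =>
              (PySem.List.pyRange 0 (min ngrams ((i.length : Int) - x)) 1).map (fun k =>
                PySem.Str.join " " (PySem.List.slice i (some x) (some (x + k + 1)))))) by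
    simpa using h []
  induction text with
  | nil => intro acc; simp
  | cons i text ih =>
    intro acc
    simp only [List.foldl_cons, List.flatMap_cons]
    rw [foldl_append_map, ih, per_row, List.append_assoc]
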